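-- pv_equiv track=rewrite | github.com/Edition-X/arcane | src/arcane/infra/markdown.py | _append_under_existing_category
-- ===== SOURCE A (Python) =====
-- def _append_under_existing_category(body: str, category_heading: str, section_content: str) -> str:
--     lines = body.split("\n")
--     result_lines = []
--     i = 0
--
--     while i < len(lines):
--         line = lines[i]
--         result_lines.append(line)
--
--         if line == f"## {category_heading}":
--             i += 1
--             while i < len(lines) and lines[i].strip() == "":
--                 result_lines.append(lines[i])
--                 i += 1
--             while i < len(lines) and not lines[i].startswith("## "):
--                 result_lines.append(lines[i])
--                 i += 1
--             result_lines.append("")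
--             result_lines.append(section_content)
--             continue
--
--         i += 1
--
--     return "\n".join(result_lines) + "\n"
-- ===== SOURCE B (Python) =====
-- def _append_under_existing_category(body: str, category_heading: str, section_content: str) -> str:
--     target = f"## {category_heading}"
--     result = []
--     in_target = False
--     for line in body.split("\n"):
--         if line.startswith("## "):
--             if in_target:
--                 result.append("")
--                 result.append(section_content)
--             in_target = (line == target)
--         result.append(line)
--     if in_target:
--         result.append("")
--         result.append(section_content)
--     return "\n".join(result) + "\n"
-- ===== Notes on version B (the rewrite author's own statement) =====
-- stated objective: simpler
-- what changed: Replaced the index-driven outer while loop with two nested skip-ahead while loops by a single for-loop over the lines that carries an in_target flag and flushes the inserted section at each next '## ' heading or at end of body.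
import Mathlib
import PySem

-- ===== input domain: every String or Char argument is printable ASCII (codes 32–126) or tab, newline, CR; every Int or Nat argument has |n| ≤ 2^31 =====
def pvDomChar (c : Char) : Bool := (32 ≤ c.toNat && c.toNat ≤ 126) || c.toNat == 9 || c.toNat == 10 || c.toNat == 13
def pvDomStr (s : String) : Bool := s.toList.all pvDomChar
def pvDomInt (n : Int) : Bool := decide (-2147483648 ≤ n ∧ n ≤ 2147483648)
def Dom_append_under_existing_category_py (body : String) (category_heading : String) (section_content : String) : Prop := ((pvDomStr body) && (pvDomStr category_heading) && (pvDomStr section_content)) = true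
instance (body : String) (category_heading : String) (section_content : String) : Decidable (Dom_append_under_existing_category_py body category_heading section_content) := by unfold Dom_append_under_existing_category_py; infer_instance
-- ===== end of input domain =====

-- B replaces A's index-driven outer while loop with nested skip-ahead inner loops by a
-- single flag-carrying pass over the lines (objective: simpler).

-- ===== PORT A =====
-- inner while loop 1: 'while i < len(lines) and lines[i].strip() == ""' (consumed lines, remainder)
def pyA_skipBlanks : List String → List String × List String
  | [] => ([], [])
  | l :: rest =>
    if PySem.Str.strip l == "" then
      ((pyA_skipBlanks rest).1.cons l, (pyA_skipBlanks rest).2)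
    else ([], l :: rest)

-- inner while loop 2: 'while i < len(lines) and not lines[i].startswith("## ")'
def pyA_skipSection : List String → List String × List String
  | [] => ([], [])
  | l :: rest =>
    if PySem.Str.startswith l "## " then ([], l :: rest)
    else ((pyA_skipSection rest).1.cons l, (pyA_skipSection rest).2)

theorem pyA_skipBlanks_len (xs : List String) : (pyA_skipBlanks xs).2.length ≤ xs.length := by
  induction xs with
  | nil => simp [pyA_skipBlanks]
  | cons l rest ih =>
    by_cases h : (PySem.Str.strip l == "") = true
    · rw [pyA_skipBlanks, if_pos h]; simpa using Nat.le_succ_of_le ih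
    · rw [pyA_skipBlanks, if_neg h]

theorem pyA_skipSection_len (xs : List String) : (pyA_skipSection xs).2.length ≤ xs.length := by
  induction xs with
  | nil => simp [pyA_skipSection]
  | cons l rest ih =>
    by_cases h : (PySem.Str.startswith l "## ") = true
    · rw [pyA_skipSection, if_pos h]
    · rw [pyA_skipSection, if_neg h]; simpa using Nat.le_succ_of_le ih

-- A's outer while loop over the line index i
def pyA_loop (t c : String) : List String → List String
  | [] => []
  | l :: rest =>
    if l == t then
      l :: ((pyA_skipBlanks rest).1 ++
            (pyA_skipSection (pyA_skipBlanks rest).2).1 ++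
            "" :: c :: pyA_loop t c (pyA_skipSection (pyA_skipBlanks rest).2).2)
    else
      l :: pyA_loop t c rest
termination_by xs => xs.length
decreasing_by
  · exact Nat.lt_succ_of_le (le_trans (pyA_skipSection_len _) (pyA_skipBlanks_len _))
  · exact Nat.lt_succ_of_le (Nat.le_refl _)

def append_under_existing_category_py (body : String) (category_heading : String) (section_content : String) : String :=
  PySem.Str.join "\n"
    (pyA_loop ("## " ++ category_heading) section_content ((PySem.Str.split? body "\n").getD [])) ++ "\n"

-- ===== PORT B =====
-- B's single for-loop with the in_target flag (the trailing flush is the [] case)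
def pyB_loop (t c : String) (inT : Bool) : List String → List String
  | [] => if inT then ["", c] else []
  | l :: rest =>
    if PySem.Str.startswith l "## " then
      if inT then "" :: c :: l :: pyB_loop t c (l == t) rest
      else l :: pyB_loop t c (l == t) rest
    else
      l :: pyB_loop t c inT rest

def append_under_existing_category_py_alt (body : String) (category_heading : String) (section_content : String) : String :=
  PySem.Str.join "\n"
    (pyB_loop ("## " ++ category_heading) section_content false ((PySem.Str.split? body "\n").getD [])) ++ "\n"

-- ===== PRECONDITION & SPEC =====
def Spec_append_under_existing_category_py (body : String) (category_heading : String) (section_content : String) (out : String) : Prop := out = append_under_existing_category_py_alt body category_heading section_content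
instance (body : String) (category_heading : String) (section_content : String) (out : String) : Decidable (Spec_append_under_existing_category_py body category_heading section_content out) := by unfold Spec_append_under_existing_category_py; infer_instance

-- ===== CLAIM (what is proved, stated in full; the proofs are below) =====
def Claim_equal_append_under_existing_category_py : Prop := ∀ (body : String) (category_heading : String) (section_content : String), Dom_append_under_existing_category_py body category_heading section_content → Spec_append_under_existing_category_py body category_heading section_content (append_under_existing_category_py body category_heading section_content)

-- ===== LEMMAS AND PROOFS =====

-- a fully blank line never starts with "## "
theorem pv_blank_not_head (l : String) (hb : (PySem.Str.strip l == "") = true) :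
    PySem.Str.startswith l "## " = false := by
  have h1 : PySem.Chars.strip l.toList = [] := by
    have h := beq_iff_eq.mp hb
    calc PySem.Chars.strip l.toList = (PySem.Str.strip l).toList := (PySem.Str.toList_strip l).symm
      _ = [] := by rw [h]; rfl
  by_contra hsw
  rw [Bool.not_eq_false] at hsw
  have hpre : ("## ".toList) <+: l.toList := by
    have := PySem.Str.startswith_eq l "## "
    rw [this] at hsw
    exact (PySem.Chars.startswith_iff _ _).mp hsw
  obtain ⟨tail, htl⟩ := hpre
  have hmem : '#' ∈ l.toList := by
    rw [← htl]; simp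
  have hall : ∀ x ∈ l.toList, PySem.Chars.isspace x = true := by
    intro x hx
    simp only [PySem.Chars.strip, PySem.Chars.rstrip, PySem.Chars.lstrip] at h1
    have h2 : List.dropWhile PySem.Chars.isspace
        ((List.dropWhile PySem.Chars.isspace l.toList).reverse) = [] := by
      have := congrArg List.reverse h1
      simpa using this
    rw [List.dropWhile_eq_nil_iff] at h2
    rcases List.mem_append.mp ((List.takeWhile_append_dropWhile (p := PySem.Chars.isspace) (l := l.toList)) ▸ hx) with h | h
    · exact List.mem_takeWhile_imp h
    · exact h2 _ (List.mem_reverse.mpr h)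
  have := hall '#' hmem
  simp [PySem.Chars.isspace] at this

-- A's two inner loops compose into one "consume until next '## ' line" scan
theorem pv_seg (xs : List String) :
    (pyA_skipBlanks xs).1 ++ (pyA_skipSection (pyA_skipBlanks xs).2).1 = (pyA_skipSection xs).1
    ∧ (pyA_skipSection (pyA_skipBlanks xs).2).2 = (pyA_skipSection xs).2 := by
  induction xs with
  | nil => simp [pyA_skipBlanks, pyA_skipSection]
  | cons l rest ih =>
    by_cases hb : (PySem.Str.strip l == "") = true
    · have hh : ¬ (PySem.Str.startswith l "## " = true) := by
        rw [pv_blank_not_head l hb]; simp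
      rw [pyA_skipBlanks, if_pos hb, pyA_skipSection, if_neg hh]
      constructor
      · simpa using ih.1
      · simpa using ih.2
    · rw [pyA_skipBlanks, if_neg hb]; simp

-- simultaneous invariant: A's loop matches B's loop with in_target = false, and A's
-- post-match consumption followed by the insertion matches B's loop with in_target = true
theorem pv_main (t c : String) (ht : PySem.Str.startswith t "## " = true) :
    ∀ n (xs : List String), xs.length ≤ n →
      pyA_loop t c xs = pyB_loop t c false xs ∧
      (pyA_skipSection xs).1 ++ "" :: c :: pyA_loop t c (pyA_skipSection xs).2
        = pyB_loop t c true xs := by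
  intro n
  induction n with
  | zero =>
    intro xs h
    cases xs with
    | nil => simp [pyA_loop, pyB_loop, pyA_skipSection]
    | cons a as => simp at h
  | succ n ih =>
    intro xs hlen
    match xs with
    | [] => simp [pyA_loop, pyB_loop, pyA_skipSection]
    | l :: rest =>
      have hr : rest.length ≤ n := by simpa using Nat.lt_succ_iff.mp (Nat.lt_of_lt_of_le (by simp) hlen)
      have hA_match : (l == t) = true → pyA_loop t c (l :: rest) = l :: pyB_loop t c true rest := by
        intro hlt
        rw [pyA_loop, if_pos hlt]
        congr 1
        rw [(pv_seg rest).1, (pv_seg rest).2]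
        exact (ih rest hr).2
      constructor
      · -- false case
        by_cases hlt : (l == t) = true
        · have hl : l = t := beq_iff_eq.mp hlt
          have hh : PySem.Str.startswith l "## " = true := by rw [hl]; exact ht
          rw [hA_match hlt, pyB_loop, if_pos hh, if_neg (by simp), hlt]
        · rw [pyA_loop, if_neg hlt, pyB_loop]
          by_cases hh : PySem.Str.startswith l "## " = true
          · have hlt2 : (l == t) = false := by simpa using hlt
            rw [if_pos hh, if_neg (by simp), hlt2]
            exact congrArg _ (ih rest hr).1
          · rw [if_neg hh]
            exact congrArg _ (ih rest hr).1
      · -- true case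
        by_cases hh : PySem.Str.startswith l "## " = true
        · rw [pyA_skipSection, if_pos hh]
          rw [pyB_loop, if_pos hh, if_pos rfl, List.nil_append]
          by_cases hlt : (l == t) = true
          · rw [hA_match hlt, hlt]
          · have hlt2 : (l == t) = false := by simpa using hlt
            rw [pyA_loop, if_neg hlt, hlt2]
            exact congrArg _ (congrArg _ (congrArg _ (ih rest hr).1))
        · rw [pyA_skipSection, if_neg hh]
          rw [pyB_loop, if_neg hh]
          simp only [List.cons_append]
          exact congrArg _ (ih rest hr).2

theorem pv_head_target (h : String) : PySem.Str.startswith ("## " ++ h) "## " = true := by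
  rw [PySem.Str.startswith_eq, PySem.Chars.startswith_iff, String.toList_append]
  exact List.prefix_append _ _

-- ===== VERDICT (by name: the statement is the Claim_ definition above) =====
theorem append_under_existing_category_py_spec : Claim_equal_append_under_existing_category_py := by
  intro body category_heading section_content _
  unfold Spec_append_under_existing_category_py
  unfold append_under_existing_category_py append_under_existing_category_py_alt
  rw [(pv_main ("## " ++ category_heading) section_content (pv_head_target category_heading)
      ((PySem.Str.split? body "\n").getD []).length ((PySem.Str.split? body "\n").getD []) (Nat.le_refl _)).1]
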